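-- pv_equiv track=rewrite | github.com/Thom2503/basecamp | arch1/week3/modularrectangles.py | create_rectangle_f
-- ===== SOURCE A (Python) =====
-- def create_rectangle_f(w, h):
--     """
--     Functie om een rechthoek te maken met nummers 0 t/m 9, op basis van de
--     hoogte en breedte aangegeven door de gebruiker. (for loop)
--
--     @param int w - de breedte
--     @param int h - de hoogte
--
--     @return string - de rechthoek
--     """
--     rectangle = ""
--
--     k = 0 # variable voor de nummers in de rechthoek
--
--     for i in range(0, h): # loop de width het aantal van h
--         for j in range(0, w): # loop het aantal keer in de width
--             rectangle += str(k % 10)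
--             k += 1
--         rectangle += "\n"
--
--     return rectangle
-- ===== SOURCE B (Python) =====
-- def create_rectangle_f(w, h):
--     digits = ''.join(str(n % 10) for n in range(max(w, 0) * max(h, 0)))
--     rectangle = ""
--     for i in range(h):
--         rectangle += digits[i * w : i * w + w] + "\n"
--     return rectangle
-- ===== Notes on version B (the rewrite author's own statement) =====
-- stated objective: alternative
-- what changed: Replaces the nested loops with a running counter by building the whole digit sequence flat in one pass and then slicing it into rows of width w.
import Mathlib
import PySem

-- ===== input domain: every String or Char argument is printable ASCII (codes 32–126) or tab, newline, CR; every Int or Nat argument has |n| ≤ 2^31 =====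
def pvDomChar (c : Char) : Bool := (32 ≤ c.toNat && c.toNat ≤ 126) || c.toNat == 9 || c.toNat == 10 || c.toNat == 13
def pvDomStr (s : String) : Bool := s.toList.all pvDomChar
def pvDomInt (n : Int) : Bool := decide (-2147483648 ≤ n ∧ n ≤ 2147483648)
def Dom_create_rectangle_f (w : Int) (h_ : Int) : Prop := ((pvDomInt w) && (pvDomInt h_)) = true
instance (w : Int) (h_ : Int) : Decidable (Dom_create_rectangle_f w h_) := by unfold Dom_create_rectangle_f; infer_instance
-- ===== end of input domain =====

-- B replaces A's nested loops with a running counter by one flat digit string sliced into rows (alternative decomposition, same cost).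

-- str(n % 10) as a list of characters (shared by both ports)
def pvDigit (n : Int) : List Char := PySem.Int.toChars (PySem.Int.mod n 10)

-- ===== PORT A =====
def create_rectangle_f (w : Int) (h_ : Int) : String :=
  let st := (PySem.List.pyRange 0 h_ 1).foldl
    (fun (st : List Char × Int) _i =>
      let st2 := (PySem.List.pyRange 0 w 1).foldl
        (fun (q : List Char × Int) _j => (q.1 ++ pvDigit q.2, q.2 + 1)) st
      (st2.1 ++ ['\n'], st2.2))
    ([], 0)
  String.ofList st.1

-- ===== PORT B =====
def create_rectangle_f_alt (w : Int) (h_ : Int) : String :=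
  let digits : List Char := ((PySem.List.pyRange 0 (max w 0 * max h_ 0) 1).map pvDigit).flatten
  let rectangle : List Char := (PySem.List.pyRange 0 h_ 1).foldl
    (fun acc i => acc ++ PySem.List.slice digits (some (i * w)) (some (i * w + w)) ++ ['\n']) []
  String.ofList rectangle

-- ===== PRECONDITION & SPEC =====
def Spec_create_rectangle_f (w : Int) (h_ : Int) (out : String) : Prop := out = create_rectangle_f_alt w h_
instance (w : Int) (h_ : Int) (out : String) : Decidable (Spec_create_rectangle_f w h_ out) := by unfold Spec_create_rectangle_f; infer_instance

-- ===== CLAIM (what is proved, stated in full; the proofs are below) =====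
def Claim_equal_create_rectangle_f : Prop := ∀ (w : Int) (h_ : Int), Dom_create_rectangle_f w h_ → Spec_create_rectangle_f w h_ (create_rectangle_f w h_)

-- ===== LEMMAS AND PROOFS =====

-- str(m) is a single character for 0 ≤ m < 10
lemma toChars_digit (m : Int) (h0 : 0 ≤ m) (h1 : m < 10) :
    PySem.Int.toChars m = [Char.ofNat (48 + m.toNat)] := by
  interval_cases m <;> decide

lemma pvDigit_singleton (n : Int) :
    pvDigit n = [Char.ofNat (48 + (PySem.Int.mod n 10).toNat)] := by
  exact toChars_digit _ (PySem.Int.mod_nonneg n (by norm_num)) (PySem.Int.mod_lt n (by norm_num))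

lemma flatten_map_pvDigit (l : List Int) :
    (l.map pvDigit).flatten = l.map (fun n => Char.ofNat (48 + (PySem.Int.mod n 10).toNat)) := by
  induction l with
  | nil => rfl
  | cons a l ih => simp [pvDigit_singleton, ih]

-- the row produced by A's inner loop starting at counter k, as a function of the iteration count
def pvRow (k : Int) (m : Nat) : List Char :=
  ((List.range m).map (fun (j : Nat) => pvDigit (k + (j : Int)))).flatten

lemma inner_loop (l : List Int) (s : List Char) (k : Int) :
    l.foldl (fun (q : List Char × Int) _j => (q.1 ++ pvDigit q.2, q.2 + 1)) (s, k)
      = (s ++ pvRow k l.length, k + l.length) := by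
  induction l generalizing s k with
  | nil => simp [pvRow]
  | cons a l ih =>
    simp only [List.foldl_cons, ih, List.length_cons, Prod.mk.injEq]
    refine ⟨?_, ?_⟩
    · have : pvRow k (l.length + 1) = pvDigit k ++ pvRow (k + 1) l.length := by
        simp only [pvRow, List.range_succ_eq_map, List.map_cons, List.map_map, List.flatten_cons]
        congr 1
        · simp
        · congr 1
          refine List.map_congr_left (fun j _ => ?_)
          simp only [Function.comp_apply]
          congr 1
          push_cast
          ring
      rw [this, List.append_assoc]
    · push_cast
      ring

lemma pvRow_eq_pyRange (k : Int) (m : Nat) :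
    pvRow k m = ((PySem.List.pyRange k (k + m) 1).map pvDigit).flatten := by
  rw [PySem.List.pyRange_one]
  have hm : ((k + (m : Int)) - k).toNat = m := by omega
  rw [hm, pvRow, List.map_map]
  simp only [Function.comp_def]

lemma slice_nil {α : Type} (a b : Int) :
    PySem.List.slice ([] : List α) (some a) (some b) = [] := by
  simp [PySem.List.slice]

lemma drop_map_pyRange (g : Int → Char) (N : Int) (a : Nat) (haN : (a : Int) ≤ N) :
    (((PySem.List.pyRange 0 N 1).map g).drop a) = (PySem.List.pyRange a N 1).map g := by
  rw [PySem.List.pyRange_one_append 0 a N (by positivity) haN, List.map_append,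
    List.drop_left' (by simp [PySem.List.length_pyRange_one])]

lemma take_map_pyRange (g : Int → Char) (a b N : Int) (h0 : 0 ≤ b) (h : a + b ≤ N) :
    (((PySem.List.pyRange a N 1).map g).take b.toNat) = (PySem.List.pyRange a (a + b) 1).map g := by
  rw [PySem.List.pyRange_one_append a (a + b) N (by omega) h]
  rw [List.map_append]
  rw [List.take_left']
  simp [PySem.List.length_pyRange_one]

lemma slice_digits (N a b : Int) (ha : 0 ≤ a) (hb : 0 ≤ b) (hN : a + b ≤ N) :
    PySem.List.slice (((PySem.List.pyRange 0 N 1).map pvDigit).flatten) (some a) (some (a + b))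
      = ((PySem.List.pyRange a (a + b) 1).map pvDigit).flatten := by
  rw [flatten_map_pvDigit, flatten_map_pvDigit]
  rw [PySem.List.slice_toNat _ ha (by omega)]
  have htn : (a + b).toNat - a.toNat = b.toNat := by omega
  rw [htn]
  have ha' : a = ((a.toNat : Nat) : Int) := by omega
  rw [drop_map_pyRange _ N a.toNat (by omega)]
  rw [← ha']
  exact take_map_pyRange _ a b N hb hN

-- the combined outer-loop invariant: after n rows A's state is (B's accumulator, n·max w 0)
lemma main_loop (w h_ : Int) (n : Nat) (hn : (n : Int) ≤ h_) :
    (PySem.List.pyRange 0 (n : Int) 1).foldl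
      (fun (st : List Char × Int) _i =>
        let st2 := (PySem.List.pyRange 0 w 1).foldl
          (fun (q : List Char × Int) _j => (q.1 ++ pvDigit q.2, q.2 + 1)) st
        (st2.1 ++ ['\n'], st2.2)) ([], 0)
    = ((PySem.List.pyRange 0 (n : Int) 1).foldl
        (fun acc i => acc ++ PySem.List.slice (((PySem.List.pyRange 0 (max w 0 * max h_ 0) 1).map pvDigit).flatten)
          (some (i * w)) (some (i * w + w)) ++ ['\n']) [],
       ((n : Int) * (w.toNat : Int))) := by
  induction n with
  | zero => simp [PySem.List.pyRange_one_eq_nil]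
  | succ n ih =>
    have hn' : (n : Int) ≤ h_ := by push_cast at hn ⊢; omega
    have hsplit : PySem.List.pyRange 0 ((n : Int) + 1) 1
        = PySem.List.pyRange 0 (n : Int) 1 ++ [(n : Int)] := by
      exact PySem.List.pyRange_one_succ_right (by positivity)
    push_cast
    rw [hsplit, List.foldl_append, List.foldl_append, ih hn']
    simp only [List.foldl_cons, List.foldl_nil]
    rw [inner_loop]
    rw [PySem.List.length_pyRange_one]
    simp only [Prod.mk.injEq]
    refine ⟨?_, ?_⟩
    · -- the row equals the slice
      rw [show (w - 0).toNat = w.toNat from by omega]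
      congr 1
      congr 1
      by_cases hw : w ≤ 0
      · -- w ≤ 0 : empty row, empty digits
        have hm0 : max w 0 * max h_ 0 = 0 := by rw [max_eq_right hw, zero_mul]
        have : PySem.List.pyRange 0 (max w 0 * max h_ 0) 1 = [] := by
          rw [hm0]; exact PySem.List.pyRange_one_eq_nil (by omega)
        rw [this]
        have hw0 : w.toNat = 0 := by omega
        simp [hw0, pvRow, slice_nil]
      · -- 0 < w
        rw [not_le] at hw
        have hwn : ((w.toNat : Nat) : Int) = w := by omega
        rw [pvRow_eq_pyRange, hwn]
        have hn1 : (n : Int) + 1 ≤ h_ := by omega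
        have hb : (n : Int) * w + w ≤ w * h_ := by nlinarith
        have hNN : max w 0 * max h_ 0 = w * h_ := by
          rw [max_eq_left (le_of_lt hw), max_eq_left (by omega : (0:Int) ≤ h_)]
        rw [hNN]
        exact (slice_digits (w * h_) ((n : Int) * w) w (by positivity) (le_of_lt hw) hb).symm
    · rw [show ((w - 0).toNat : Int) = (w.toNat : Int) from by omega]
      ring

-- ===== VERDICT (by name: the statement is the Claim_ definition above) =====
theorem create_rectangle_f_spec : Claim_equal_create_rectangle_f := by
  intro w h_ _
  unfold Spec_create_rectangle_f create_rectangle_f create_rectangle_f_alt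
  by_cases hh : 0 ≤ h_
  · obtain ⟨m, rfl⟩ : ∃ m : Nat, h_ = (m : Int) := ⟨h_.toNat, by omega⟩
    simp only [main_loop w (m : Int) m (le_refl _)]
  · have hnil : PySem.List.pyRange 0 h_ 1 = [] := PySem.List.pyRange_one_eq_nil (by omega)
    simp [hnil]
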